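-- pv_equiv track=rewrite | github.com/petteriTeikari/deep-biblio-tools | src/converters/md_to_latex/utils.py | normalize_arxiv_url
-- ===== SOURCE A (Python) =====
-- def normalize_arxiv_url(url: str) -> str:
--     """Normalize arXiv URL by removing version specifiers.
--
--     Converts:
--     - https://arxiv.org/abs/2508.12683v1 -> https://arxiv.org/abs/2508.12683
--     - https://arxiv.org/abs/2508.12683v2 -> https://arxiv.org/abs/2508.12683
--     - https://arxiv.org/html/2410.20199v1 -> https://arxiv.org/abs/2410.20199
--
--     Args:
--         url: Original arXiv URL (may include version)
--
--     Returns: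
--         Normalized URL without version, always using /abs/ format
--     """
--     if not url or "arxiv.org" not in url:
--         return url
--
--     # Normalize to use /abs/ instead of /html/ or /pdf/
--     url = url.replace("arxiv.org/html/", "arxiv.org/abs/")
--     url = url.replace("arxiv.org/pdf/", "arxiv.org/abs/")
--
--     # Remove version specifier (vN at the end)
--     if "arxiv.org/abs/" in url:
--         abs_pos = url.find("arxiv.org/abs/")
--         after_abs = url[abs_pos + 14 :]
--
--         # Find where the ID ends (look for v followed by digits)
--         for i in range(len(after_abs)):
--             if after_abs[i] == "v" and i > 0:
--                 # Check if followed by digits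
--                 remaining = after_abs[i + 1 :]
--                 if (
--                     remaining
--                     and remaining.split("/")[0].split("?")[0].isdigit()
--                 ):
--                     # Found version specifier, remove it
--                     url = url[: abs_pos + 14 + i]
--                     break
--
--     return url
-- ===== SOURCE B (Python) =====
-- def normalize_arxiv_url(url: str) -> str:
--     """Normalize arXiv URL: /html/ and /pdf/ -> /abs/, and cut a vN version suffix.
--
--     Instead of testing every index of the tail, jump between 'v' occurrences with
--     str.find and check the digit run in place (no slicing/splitting per position).
--     """
--     if not url or "arxiv.org" not in url:
--         return url
--     url = url.replace("arxiv.org/html/", "arxiv.org/abs/")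
--     url = url.replace("arxiv.org/pdf/", "arxiv.org/abs/")
--     pos = url.find("arxiv.org/abs/")
--     if pos == -1:
--         return url
--     n = len(url)
--     j = url.find("v", pos + 15)  # the 'v' may not be the first char after /abs/
--     while j != -1:
--         k = j + 1
--         while k < n and url[k].isdigit():
--             k += 1
--         if k > j + 1 and (k == n or url[k] in "/?"):
--             return url[:j]
--         j = url.find("v", j + 1)
--     return url
-- ===== Notes on version B (the rewrite author's own statement) =====
-- stated objective: alternative
-- what changed: A scans every index of the tail after 'arxiv.org/abs/', slicing the remainder and double-splitting it at each position; B jumps directly between 'v' occurrences with str.find(start) and checks the digit run and its boundary character in place, with no per-position slicing or splitting.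
import Mathlib
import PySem

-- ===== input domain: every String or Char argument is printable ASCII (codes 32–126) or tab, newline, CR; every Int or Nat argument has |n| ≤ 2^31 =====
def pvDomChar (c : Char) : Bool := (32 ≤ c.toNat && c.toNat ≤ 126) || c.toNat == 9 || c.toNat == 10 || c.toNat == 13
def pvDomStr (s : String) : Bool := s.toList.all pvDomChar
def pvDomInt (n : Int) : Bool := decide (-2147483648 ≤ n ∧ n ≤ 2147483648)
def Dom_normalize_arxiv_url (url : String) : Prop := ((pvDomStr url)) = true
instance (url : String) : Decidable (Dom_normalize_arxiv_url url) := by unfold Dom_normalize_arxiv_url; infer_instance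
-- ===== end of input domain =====

-- B replaces A's per-index scan (slice + double split + isdigit at every position) by
-- find('v', …) jumps between candidate 'v's with an in-place digit-run check (objective: alternative).

-- ===== PORT A =====
-- the `for i in range(len(after_abs))` loop: returns the truncated url on break, url2 on fall-through
def pvLoopA (url2 : String) (absPos : Int) (afterAbs : List Char) (i : Nat) : String :=
  if h : i < afterAbs.length then
    if afterAbs[i] = 'v' ∧ 0 < i then
      let remaining := afterAbs.drop (i + 1)
      if remaining ≠ [] ∧ PySem.Chars.strIsdigit
          ((PySem.Chars.splitOn ((PySem.Chars.splitOn remaining ['/']).headD []) ['?']).headD []) = true then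
        PySem.Str.slice url2 none (some (absPos + 14 + (i : Int)))   -- url[: abs_pos + 14 + i]
      else pvLoopA url2 absPos afterAbs (i + 1)
    else pvLoopA url2 absPos afterAbs (i + 1)
  else url2
termination_by afterAbs.length - i

def normalize_arxiv_url (url : String) : String :=
  if url = "" ∨ PySem.Str.isIn "arxiv.org" url = false then url
  else
    let url1 := PySem.Str.replace url "arxiv.org/html/" "arxiv.org/abs/"
    let url2 := PySem.Str.replace url1 "arxiv.org/pdf/" "arxiv.org/abs/"
    if PySem.Str.isIn "arxiv.org/abs/" url2 = true then
      let absPos := PySem.Str.find url2 "arxiv.org/abs/"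
      let afterAbs := (PySem.Str.slice url2 (some (absPos + 14)) none).toList
      pvLoopA url2 absPos afterAbs 0
    else url2

-- ===== PORT B =====
-- `while k < n and url[k].isdigit(): k += 1` — returns the final k
def pvRunB (s : List Char) (k : Nat) : Nat :=
  if h : k < s.length then
    if PySem.Chars.isdigit s[k] then pvRunB s (k + 1) else k
  else k
termination_by s.length - k

-- `url.find("v", start)`: `none` stands for Python's -1
def pvNextV (s : List Char) (start : Int) : Option Nat :=
  let r := PySem.Chars.findFrom s ['v'] start
  if r = -1 then none else some r.toNat

-- The next four theorems are the termination facts pvLoopB's decreasing_by cites.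
theorem pvFindFrom_natCast (s : List Char) (t : Nat) :
    PySem.Chars.findFrom s ['v'] (t : Int)
      = if s.length < t then -1
        else if PySem.Chars.find (s.drop t) ['v'] = -1 then -1
        else (t : Int) + PySem.Chars.find (s.drop t) ['v'] := by
  simp only [PySem.Chars.findFrom]
  have h0 : ¬((t : Int) < 0) := by omega
  simp only [h0, if_false, Int.toNat_natCast, List.take_length]
  split_ifs <;> first | rfl | omega

theorem pvPrefSingleton (a : Char) (l : List Char) : [a] <+: l ↔ l.head? = some a := by
  cases l with
  | nil => simp
  | cons c t =>
    simp [List.cons_prefix_cons]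
    exact eq_comm

theorem pvNextV_natCast (s : List Char) (t : Nat) :
    pvNextV s (t : Int)
      = if s.length < t then none
        else if PySem.Chars.find (s.drop t) ['v'] = -1 then none
        else some (t + (PySem.Chars.find (s.drop t) ['v']).toNat) := by
  by_cases h1 : s.length < t
  · simp [pvNextV, pvFindFrom_natCast, h1]
  · by_cases h2 : PySem.Chars.find (s.drop t) ['v'] = -1
    · simp [pvNextV, pvFindFrom_natCast, h1, h2]
    · have hge : 0 ≤ PySem.Chars.find (s.drop t) ['v'] := by
        have := PySem.Chars.neg_one_le_find (s.drop t) ['v']; omega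
      simp only [pvNextV, pvFindFrom_natCast, h1, h2, if_false]
      rw [if_neg (by omega)]
      congr 1
      omega

theorem pvNextV_bounds (s : List Char) (t j : Nat)
    (h : pvNextV s (t : Int) = some j) : t ≤ j ∧ j < s.length ∧ s[j]? = some 'v' := by
  rw [pvNextV_natCast] at h
  split_ifs at h with h1 h2 <;> simp at h
  have hge : 0 ≤ PySem.Chars.find (s.drop t) ['v'] := by
    have := PySem.Chars.neg_one_le_find (s.drop t) ['v']; omega
  obtain ⟨hpre, -⟩ := PySem.Chars.find_spec hge
  rw [List.drop_drop] at hpre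
  rw [pvPrefSingleton, List.head?_drop] at hpre
  subst h
  obtain ⟨hl, -⟩ := List.getElem?_eq_some_iff.mp hpre
  exact ⟨by omega, hl, hpre⟩

-- the `while j != -1` loop of B
def pvLoopB (url : String) (s : List Char) (j? : Option Nat) : String :=
  match j? with
  | none => url
  | some j =>
    let k := pvRunB s (j + 1)
    -- `k == n or url[k] in "/?"`: url[k] is in range there since k ≤ n and k ≠ n
    if j + 1 < k ∧ (k = s.length ∨ s[k]? = some '/' ∨ s[k]? = some '?') then
      PySem.Str.slice url none (some (j : Int))   -- url[:j]
    else pvLoopB url s (pvNextV s ((j + 1 : Nat) : Int))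
termination_by match j? with | none => 0 | some j => s.length + 2 - min j (s.length + 1)
decreasing_by
  rcases hnv : pvNextV s ((j + 1 : Nat) : Int) with _ | j'
  · simp
  · have := pvNextV_bounds s (j + 1) j' hnv
    simp
    omega

def normalize_arxiv_url_alt (url : String) : String :=
  if url = "" ∨ PySem.Str.isIn "arxiv.org" url = false then url
  else
    let url1 := PySem.Str.replace url "arxiv.org/html/" "arxiv.org/abs/"
    let url2 := PySem.Str.replace url1 "arxiv.org/pdf/" "arxiv.org/abs/"
    let pos := PySem.Str.find url2 "arxiv.org/abs/"
    if pos = -1 then url2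
    else pvLoopB url2 url2.toList (pvNextV url2.toList (pos + 15))

-- ===== PRECONDITION & SPEC =====
def Spec_normalize_arxiv_url (url : String) (out : String) : Prop := out = normalize_arxiv_url_alt url
instance (url : String) (out : String) : Decidable (Spec_normalize_arxiv_url url out) := by unfold Spec_normalize_arxiv_url; infer_instance

-- ===== CLAIM (what is proved, stated in full; the proofs are below) =====
def Claim_equal_normalize_arxiv_url : Prop := ∀ (url : String), Dom_normalize_arxiv_url url → Spec_normalize_arxiv_url url (normalize_arxiv_url url)

-- ===== LEMMAS AND PROOFS =====

theorem pvFindEq (l sub : List Char) (m : Nat)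
    (hm : sub <+: l.drop m) (hmin : ∀ i < m, ¬ sub <+: l.drop i) :
    PySem.Chars.find l sub = (m : Int) := by
  have hinf : sub <:+: l := hm.isInfix.trans (List.drop_suffix m l).isInfix
  have h0 : 0 ≤ PySem.Chars.find l sub := (PySem.Chars.find_nonneg_iff l sub).mpr hinf
  obtain ⟨hpre, hmin'⟩ := PySem.Chars.find_spec h0
  have : (PySem.Chars.find l sub).toNat = m := by
    rcases lt_trichotomy (PySem.Chars.find l sub).toNat m with h | h | h
    · exact absurd hpre (hmin _ h)
    · exact h
    · exact absurd hm (hmin' m h)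
  omega

theorem pvNextV_ge_length (s : List Char) (t : Nat) (h : s.length ≤ t) :
    pvNextV s (t : Int) = none := by
  rw [pvNextV_natCast]
  by_cases h1 : s.length < t
  · simp [h1]
  · have ht : t = s.length := by omega
    subst ht
    rw [if_neg h1, if_pos]
    rw [List.drop_length]
    rw [PySem.Chars.find_eq_neg_one_iff]
    simp

theorem pvNextV_self (s : List Char) (t : Nat) (h : t < s.length) (hv : s[t]? = some 'v') :
    pvNextV s (t : Int) = some t := by
  rw [pvNextV_natCast, if_neg (by omega)]
  have hf : PySem.Chars.find (s.drop t) ['v'] = (0 : Int) := by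
    apply pvFindEq
    · rw [List.drop_zero, pvPrefSingleton, List.head?_drop]; exact hv
    · intro i hi; exact absurd hi (Nat.not_lt_zero i)
  rw [hf]
  simp

theorem pvNextV_step (s : List Char) (t : Nat) (h : t < s.length) (hv : s[t]? ≠ some 'v') :
    pvNextV s (t : Int) = pvNextV s ((t + 1 : Nat) : Int) := by
  have hvv : s[t] ≠ 'v' := by
    intro he; exact hv (by rw [List.getElem?_eq_some_iff]; exact ⟨h, he⟩)
  have hcons : s.drop t = s[t] :: s.drop (t + 1) := List.drop_eq_getElem_cons h
  rw [pvNextV_natCast, pvNextV_natCast,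
    if_neg (show ¬ s.length < t by omega), if_neg (show ¬ s.length < t + 1 by omega)]
  rcases eq_or_lt_of_le (PySem.Chars.neg_one_le_find (s.drop (t + 1)) ['v']) with hf | hf
  · have hA : PySem.Chars.find (s.drop t) ['v'] = -1 := by
      rw [PySem.Chars.find_eq_neg_one_iff]
      rw [hcons, List.infix_cons_iff]
      rintro (hp | hi)
      · rw [pvPrefSingleton] at hp
        simp only [List.head?_cons, Option.some.injEq] at hp
        exact hvv hp
      · exact (PySem.Chars.find_eq_neg_one_iff _ _).mp hf.symm hi
    rw [hA, ← hf]
    simp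
  · have h0 : 0 ≤ PySem.Chars.find (s.drop (t + 1)) ['v'] := by omega
    obtain ⟨hpre, hmin'⟩ := PySem.Chars.find_spec h0
    set f := (PySem.Chars.find (s.drop (t + 1)) ['v']).toNat with hfdef
    have hA : PySem.Chars.find (s.drop t) ['v'] = ((f + 1 : Nat) : Int) := by
      apply pvFindEq
      · rw [List.drop_drop] at hpre ⊢
        have : t + (f + 1) = t + 1 + f := by omega
        rw [this]; exact hpre
      · intro i hi
        match i with
        | 0 =>
          rw [List.drop_zero, pvPrefSingleton, List.head?_drop]
          intro he; exact hv he
        | (i' + 1) =>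
          rw [List.drop_drop]
          have : t + (i' + 1) = t + 1 + i' := by omega
          rw [this, ← List.drop_drop]
          exact hmin' i' (by omega)
    rw [hA, if_neg (by omega), if_neg (by omega)]
    congr 1
    omega

theorem pvRunB_spec (s : List Char) (t : Nat) :
    pvRunB s t = t + ((s.drop t).takeWhile PySem.Chars.isdigit).length := by
  induction hd : s.length - t using Nat.strong_induction_on generalizing t with
  | _ d ih =>
    match d, hd with
    | 0, hd =>
      have hle : s.length ≤ t := by omega
      rw [pvRunB, dif_neg (by omega), List.drop_eq_nil_iff.mpr hle]
      simp
    | (d' + 1), hd =>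
      have hlt : t < s.length := by omega
      rw [pvRunB, dif_pos hlt, List.drop_eq_getElem_cons hlt, List.takeWhile_cons]
      by_cases hdg : PySem.Chars.isdigit s[t] = true
      · rw [if_pos hdg, hdg, if_pos rfl]
        rw [ih d' (by omega) (t + 1) (by omega)]
        simp; omega
      · rw [if_neg hdg, eq_false_of_ne_true hdg, if_neg (by simp)]
        simp

theorem pvGoAcc (sep : List Char) (fuel : Nat) (l cur : List Char) (acc : List (List Char)) :
    PySem.Chars.splitOn.go sep fuel l cur acc
      = acc.reverse ++ PySem.Chars.splitOn.go sep fuel l cur [] := by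
  induction fuel generalizing l cur acc with
  | zero => simp [PySem.Chars.splitOn.go]
  | succ n ih =>
    cases l with
    | nil => simp [PySem.Chars.splitOn.go]
    | cons c rest =>
      rw [PySem.Chars.splitOn.go, PySem.Chars.splitOn.go]
      by_cases hp : sep.isPrefixOf (c :: rest) = true
      · rw [if_pos hp, if_pos hp, ih, ih _ _ [cur.reverse]]
        simp
      · rw [if_neg hp, if_neg hp, ih]

theorem pvSplitHeadGo (sep : Char) (fuel : Nat) (l cur : List Char) (hf : l.length ≤ fuel) :
    (PySem.Chars.splitOn.go [sep] fuel l cur []).headD []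
      = cur.reverse ++ l.takeWhile (fun c => c ≠ sep) := by
  induction fuel generalizing l cur with
  | zero =>
    have : l = [] := by cases l <;> simp_all
    subst this
    simp [PySem.Chars.splitOn.go]
  | succ n ih =>
    cases l with
    | nil => simp [PySem.Chars.splitOn.go]
    | cons c rest =>
      rw [PySem.Chars.splitOn.go]
      have hpre : ([sep].isPrefixOf (c :: rest)) = (sep == c) := by
        simp [List.isPrefixOf]
      by_cases hc : c = sep
      · rw [if_pos (by simp [hpre, hc])]
        rw [pvGoAcc]
        simp [List.takeWhile_cons, hc]
      · rw [if_neg (by simp [hpre]; exact fun h => hc h.symm)]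
        rw [ih rest (c :: cur) (by simpa using Nat.le_of_succ_le_succ hf)]
        simp [List.takeWhile_cons, hc]

theorem pvSplitHead (s : List Char) (sep : Char) :
    (PySem.Chars.splitOn s [sep]).headD [] = s.takeWhile (fun c => c ≠ sep) := by
  rw [PySem.Chars.splitOn, pvSplitHeadGo sep (s.length + 1) s [] (by omega)]
  simp

theorem pvIsdigitNotSep (c : Char) (h : PySem.Chars.isdigit c = true) : c ≠ '/' ∧ c ≠ '?' := by
  constructor <;> rintro rfl <;> simp [PySem.Chars.isdigit] at h

theorem pvCondL (t : List Char) :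
    ((t.takeWhile (fun c => c ≠ '/')).takeWhile (fun c => c ≠ '?')).all PySem.Chars.isdigit = true
      ↔ (t[(t.takeWhile PySem.Chars.isdigit).length]? = none
         ∨ t[(t.takeWhile PySem.Chars.isdigit).length]? = some '/'
         ∨ t[(t.takeWhile PySem.Chars.isdigit).length]? = some '?') := by
  induction t with
  | nil => simp
  | cons c t ih =>
    by_cases hd : PySem.Chars.isdigit c = true
    · obtain ⟨h1, h2⟩ := pvIsdigitNotSep c hd
      simpa [List.takeWhile_cons, hd, h1, h2] using ih
    · have hd' : PySem.Chars.isdigit c = false := eq_false_of_ne_true hd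
      by_cases h1 : c = '/'
      · subst h1
        simp [List.takeWhile_cons, hd']
      · by_cases h2 : c = '?'
        · subst h2
          simp [List.takeWhile_cons, hd']
        · simp [List.takeWhile_cons, hd', h1, h2, hd]

theorem pvCondAB (rem : List Char) :
    (rem ≠ [] ∧ PySem.Chars.strIsdigit ((rem.takeWhile (fun c => c ≠ '/')).takeWhile (fun c => c ≠ '?')) = true)
      ↔ (0 < (rem.takeWhile PySem.Chars.isdigit).length
         ∧ (rem[(rem.takeWhile PySem.Chars.isdigit).length]? = none
            ∨ rem[(rem.takeWhile PySem.Chars.isdigit).length]? = some '/'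
            ∨ rem[(rem.takeWhile PySem.Chars.isdigit).length]? = some '?')) := by
  cases rem with
  | nil => simp
  | cons c t =>
    by_cases hd : PySem.Chars.isdigit c = true
    · obtain ⟨h1, h2⟩ := pvIsdigitNotSep c hd
      simpa [List.takeWhile_cons, hd, h1, h2, PySem.Chars.strIsdigit] using pvCondL t
    · have hd' : PySem.Chars.isdigit c = false := eq_false_of_ne_true hd
      by_cases h1 : c = '/'
      · subst h1
        simp [List.takeWhile_cons, hd', PySem.Chars.strIsdigit]
      · by_cases h2 : c = '?'
        · subst h2
          simp [List.takeWhile_cons, hd', h1, PySem.Chars.strIsdigit]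
        · simp [List.takeWhile_cons, hd', h1, h2, PySem.Chars.strIsdigit, hd]

-- A's remainder test at position j (absolute) ⇔ B's digit-run/boundary test at j
theorem pvCondEq (u : List Char) (j : Nat) (hj : j < u.length) :
    (u.drop (j + 1) ≠ [] ∧ PySem.Chars.strIsdigit
        ((PySem.Chars.splitOn ((PySem.Chars.splitOn (u.drop (j + 1)) ['/']).headD []) ['?']).headD []) = true)
      ↔ (j + 1 < pvRunB u (j + 1)
         ∧ (pvRunB u (j + 1) = u.length
            ∨ u[pvRunB u (j + 1)]? = some '/' ∨ u[pvRunB u (j + 1)]? = some '?')) := by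
  rw [pvSplitHead, pvSplitHead, pvRunB_spec, pvCondAB]
  set rem := u.drop (j + 1) with hremdef
  set d0 := (rem.takeWhile PySem.Chars.isdigit).length with hd0def
  have hd0le : d0 ≤ rem.length := by
    rw [hd0def]; exact (List.takeWhile_prefix _).length_le
  have hrem : rem.length = u.length - (j + 1) := by rw [hremdef]; simp
  have hkidx : u[(j + 1) + d0]? = rem[d0]? := by
    rw [hremdef, List.getElem?_drop]
  have hnone : rem[d0]? = none ↔ (j + 1) + d0 = u.length := by
    rw [List.getElem?_eq_none_iff]
    omega
  constructor
  · rintro ⟨h1, h2⟩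
    refine ⟨by omega, ?_⟩
    rcases h2 with h2 | h2 | h2
    · exact Or.inl (hnone.mp h2)
    · exact Or.inr (Or.inl (by rw [hkidx]; exact h2))
    · exact Or.inr (Or.inr (by rw [hkidx]; exact h2))
  · rintro ⟨h1, h2⟩
    refine ⟨by omega, ?_⟩
    rcases h2 with h2 | h2 | h2
    · exact Or.inl (hnone.mpr h2)
    · exact Or.inr (Or.inl (by rw [← hkidx]; exact h2))
    · exact Or.inr (Or.inr (by rw [← hkidx]; exact h2))

-- both loops return url2 once the scan is exhausted
theorem pvLoopsEnd (url2 : String) (u : List Char) (pos : Int) (P : Nat)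
    (hP : P + 14 ≤ u.length) (i : Nat) (hlen : (u.drop (P + 14)).length ≤ i) :
    pvLoopA url2 pos (u.drop (P + 14)) i = pvLoopB url2 u (pvNextV u ((P + 14 + i : Nat) : Int)) := by
  rw [pvLoopA, dif_neg (by omega)]
  rw [pvNextV_ge_length u _ (by simp at hlen; omega)]
  rw [pvLoopB]

theorem pvLoopsEq (url2 : String) (u : List Char)
    (pos : Int) (P : Nat) (hpos : pos = (P : Int)) (hP : P + 14 ≤ u.length) :
    ∀ d i, 1 ≤ i → (u.drop (P + 14)).length ≤ i + d →
      pvLoopA url2 pos (u.drop (P + 14)) i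
        = pvLoopB url2 u (pvNextV u ((P + 14 + i : Nat) : Int)) := by
  intro d
  induction d with
  | zero =>
    intro i _ hlen
    exact pvLoopsEnd url2 u pos P hP i (by omega)
  | succ d ih =>
    intro i hi1 hlen
    by_cases hend : (u.drop (P + 14)).length ≤ i
    · exact pvLoopsEnd url2 u pos P hP i hend
    · have hilt : i < (u.drop (P + 14)).length := by omega
      have hjlt : P + 14 + i < u.length := by simp at hilt; omega
      have hget : (u.drop (P + 14))[i]'hilt = u[P + 14 + i]'hjlt := by
        rw [List.getElem_drop]
      by_cases hv : u[P + 14 + i]? = some 'v'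
      · have hvv : u[P + 14 + i]'hjlt = 'v' := by
          have h' := hv
          rw [List.getElem?_eq_getElem hjlt, Option.some_inj] at h'
          exact h'
        have hv' : (u.drop (P + 14))[i]'hilt = 'v' := by rw [hget]; exact hvv
        have hdropeq : (u.drop (P + 14)).drop (i + 1) = u.drop (P + 14 + i + 1) := by
          rw [List.drop_drop]; congr 1
        have hiff := pvCondEq u (P + 14 + i) hjlt
        rw [pvLoopA, dif_pos hilt, if_pos ⟨hv', by omega⟩,
          pvNextV_self u (P + 14 + i) hjlt hv, pvLoopB]
        simp only [hdropeq]
        split_ifs with h1 h2 h2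
        · show PySem.Str.slice url2 none (some (pos + 14 + (i : Int)))
            = PySem.Str.slice url2 none (some ((P + 14 + i : Nat) : Int))
          congr 2
          subst hpos
          omega
        · exact absurd (hiff.mp h1) h2
        · exact absurd (hiff.mpr h2) h1
        · have harg : P + 14 + i + 1 = P + 14 + (i + 1) := by omega
          rw [harg]
          exact ih (i + 1) (by omega) (by omega)
      · -- not a 'v' here: both sides skip to i+1
        rw [pvLoopA, dif_pos hilt, if_neg
          (fun hcc => hv (List.getElem?_eq_some_iff.mpr ⟨hjlt, by rw [← hget]; exact hcc.1⟩))]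
        rw [pvNextV_step u (P + 14 + i) hjlt hv]
        have : P + 14 + i + 1 = P + 14 + (i + 1) := by omega
        rw [this]
        exact ih (i + 1) (by omega) (by omega)

-- i = 0 is never a candidate (the loop requires i > 0), so A's scan may start at 1
theorem pvLoopA_zero (url2 : String) (pos : Int) (aft : List Char) :
    pvLoopA url2 pos aft 0 = pvLoopA url2 pos aft 1 := by
  by_cases h : 0 < aft.length
  · rw [pvLoopA, dif_pos h, if_neg (fun hc => absurd hc.2 (lt_irrefl 0))]
  · rw [pvLoopA, dif_neg (by omega), pvLoopA, dif_neg (by omega)]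

-- ===== VERDICT (by name: the statement is the Claim_ definition above) =====
theorem normalize_arxiv_url_spec : Claim_equal_normalize_arxiv_url := by
  intro url _
  show normalize_arxiv_url url = normalize_arxiv_url_alt url
  by_cases hg : url = "" ∨ PySem.Str.isIn "arxiv.org" url = false
  · simp only [normalize_arxiv_url, normalize_arxiv_url_alt, if_pos hg]
  · simp only [normalize_arxiv_url, normalize_arxiv_url_alt, if_neg hg]
    set u2 := PySem.Str.replace (PySem.Str.replace url "arxiv.org/html/" "arxiv.org/abs/")
      "arxiv.org/pdf/" "arxiv.org/abs/" with hu2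
    by_cases hin : PySem.Str.isIn "arxiv.org/abs/" u2 = true
    · have hinf : ("arxiv.org/abs/" : String).toList <:+: u2.toList :=
        (PySem.Str.isIn_iff_infix _ _).mp hin
      have h0 : 0 ≤ PySem.Str.find u2 "arxiv.org/abs/" :=
        (PySem.Str.find_nonneg_iff _ _).mpr hinf
      set pos := PySem.Str.find u2 "arxiv.org/abs/" with hposdef
      have hne : pos ≠ -1 := by omega
      rw [if_pos hin, if_neg hne]
      set P := pos.toNat with hPdef
      have hpos : pos = (P : Int) := by omega
      have hfind : PySem.Chars.find u2.toList ("arxiv.org/abs/" : String).toList = pos :=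
        (PySem.Str.find_eq u2 _).symm
      have h0' : 0 ≤ PySem.Chars.find u2.toList ("arxiv.org/abs/" : String).toList := by
        rw [hfind]; exact h0
      obtain ⟨hpre, -⟩ := PySem.Chars.find_spec h0'
      have hlen14 : ("arxiv.org/abs/" : String).toList.length = 14 := by decide
      have hP14 : P + 14 ≤ u2.toList.length := by
        have hle := hpre.length_le
        rw [List.length_drop, hlen14, hfind] at hle
        omega
      have haft : (PySem.Str.slice u2 (some (pos + 14)) none).toList = u2.toList.drop (P + 14) := by
        rw [PySem.Str.toList_slice, PySem.Chars.slice_eq_listSlice]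
        have hc : pos + 14 = ((P + 14 : Nat) : Int) := by omega
        rw [hc, PySem.List.slice_from_natCast]
      rw [haft, pvLoopA_zero]
      have hstart : pos + 15 = ((P + 14 + 1 : Nat) : Int) := by omega
      rw [hstart]
      exact pvLoopsEq u2 u2.toList pos P hpos hP14 ((u2.toList.drop (P + 14)).length) 1
        (by omega) (by omega)
    · have hfneg : PySem.Str.find u2 "arxiv.org/abs/" = -1 := by
        rw [PySem.Str.find_eq_neg_one_iff]
        intro hinf
        exact hin ((PySem.Str.isIn_iff_infix _ _).mpr hinf)
      rw [if_neg hin, if_pos hfneg]
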